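-- pv_equiv track=rewrite | github.com/csaf-testsuite/csaf-2.0-to-csaf-2.1 | prototype_runtests.py | check_all_substrs_in
-- ===== SOURCE A (Python) =====
-- def check_all_substrs_in(substrs: list, msgs: list) -> bool:
--     """Check if all substrings are in one of the messages.
--
--     >>> check_all_substrs_in(["b"],["abc"])
--     True
--     >>> check_all_substrs_in(["f","d"],["abc","def"])
--     True
--     >>> check_all_substrs_in(["a","d"],["abc","def"])
--     False
--
--     Both lists must have at least one entry.
--
--     >>> check_all_substrs_in(None, ["abc"])
--     False
--     >>> check_all_substrs_in([],["abc"])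
--     False
--     >>> check_all_substrs_in(["a"],[])
--     False
--     >>> check_all_substrs_in(["a"],None)
--     False
--     """
--     if not substrs or not msgs:
--         return False
--
--     for msg in msgs:
--         missed_a_substring = False
--         for substr in substrs:
--             if substr not in msg:
--                 missed_a_substring = True
--         if not missed_a_substring:
--             return True
--
--     return False
-- ===== SOURCE B (Python) =====
-- def check_all_substrs_in(substrs: list, msgs: list) -> bool:
--     """Check if all substrings are in one of the messages.
--
--     Index-set strategy: keep a set of candidate message indices and
--     intersect it, for each substring, with the set of indices of messages
--     containing that substring; a non-empty intersection at the end means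
--     one single message contained every substring.
--     """
--     if not substrs or not msgs:
--         return False
--
--     candidates = set(range(len(msgs)))
--     for substr in substrs:
--         candidates &= {i for i, m in enumerate(msgs) if substr in m}
--         if not candidates:
--             return False
--     return True
-- ===== Notes on version B (the rewrite author's own statement) =====
-- stated objective: alternative
-- what changed: Replaced A's message-outer/substring-inner double loop over strings by a substring-outer loop maintaining an intersected set of candidate message INDICES (set(range(len(msgs))) filtered by each substring's hit-index set, with early exit when it empties).
import Mathlib
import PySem

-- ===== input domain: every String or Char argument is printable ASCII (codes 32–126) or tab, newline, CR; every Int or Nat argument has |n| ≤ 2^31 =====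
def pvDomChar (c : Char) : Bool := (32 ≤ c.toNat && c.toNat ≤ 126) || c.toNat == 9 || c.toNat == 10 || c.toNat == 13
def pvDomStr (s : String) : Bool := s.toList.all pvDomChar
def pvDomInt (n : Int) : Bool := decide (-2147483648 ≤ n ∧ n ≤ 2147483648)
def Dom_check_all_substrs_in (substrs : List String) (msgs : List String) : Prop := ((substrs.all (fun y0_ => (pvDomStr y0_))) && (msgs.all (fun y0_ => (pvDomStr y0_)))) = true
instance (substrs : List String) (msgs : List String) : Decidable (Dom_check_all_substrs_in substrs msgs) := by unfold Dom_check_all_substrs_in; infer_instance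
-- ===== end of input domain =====

-- B replaces A's message-outer/substring-inner scan by a substring-outer loop that intersects
-- a set of candidate message indices, exiting early when it empties (objective: alternative).


-- ===== PORT A =====
-- one step of A's outer 'for msg in msgs' loop; the inner loop is the foldl on 'missed_a_substring'
def pvLoopA (substrs : List String) (msgs : List String) : Bool :=
  match msgs with
  | [] => false
  | msg :: rest =>
      let missed := substrs.foldl (fun m s => if ¬ PySem.Str.isIn s msg then true else m) false
      if ¬ missed then true else pvLoopA substrs rest

def check_all_substrs_in (substrs : List String) (msgs : List String) : Bool :=
  if substrs.isEmpty || msgs.isEmpty then false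
  else pvLoopA substrs msgs

-- ===== PORT B =====
-- {i for i, m in enumerate(msgs) if substr in m}
def pvHits (msgs : List String) (substr : String) : PySem.Set Int :=
  PySem.Set.ofList (((PySem.List.enumerate msgs 0).filter (fun p => PySem.Str.isIn substr p.2)).map (·.1))

-- B's 'for substr in substrs' loop over the candidate index set, with the early 'return False'
def pvLoopB (msgs : List String) (substrs : List String) (candidates : PySem.Set Int) : Bool :=
  match substrs with
  | [] => true
  | substr :: rest =>
      let candidates' := PySem.Set.inter candidates (pvHits msgs substr)
      if candidates'.isEmpty then false else pvLoopB msgs rest candidates'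

def check_all_substrs_in_alt (substrs : List String) (msgs : List String) : Bool :=
  if substrs.isEmpty || msgs.isEmpty then false
  else pvLoopB msgs substrs (PySem.Set.ofList (PySem.List.pyRange 0 msgs.length 1))

-- ===== PRECONDITION & SPEC =====
def Spec_check_all_substrs_in (substrs : List String) (msgs : List String) (out : Bool) : Prop := out = check_all_substrs_in_alt substrs msgs
instance (substrs : List String) (msgs : List String) (out : Bool) : Decidable (Spec_check_all_substrs_in substrs msgs out) := by unfold Spec_check_all_substrs_in; infer_instance

-- ===== CLAIM (what is proved, stated in full; the proofs are below) =====
def Claim_equal_check_all_substrs_in : Prop := ∀ (substrs : List String) (msgs : List String), Dom_check_all_substrs_in substrs msgs → Spec_check_all_substrs_in substrs msgs (check_all_substrs_in substrs msgs)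

-- ===== LEMMAS AND PROOFS =====

-- A's 'missed_a_substring' fold computes: not every substring is in msg
theorem pvMissed_eq (substrs : List String) (msg : String) (b : Bool) :
    substrs.foldl (fun m s => if ¬ PySem.Str.isIn s msg then true else m) b
      = (b || !(substrs.all (fun s => PySem.Str.isIn s msg))) := by
  induction substrs generalizing b with
  | nil => simp
  | cons s rest ih =>
      rw [List.foldl_cons, ih]
      by_cases h : PySem.Str.isIn s msg <;> cases b <;> simp [h]

-- A's outer loop: some message contains every substring
theorem pvLoopA_eq (substrs : List String) (msgs : List String) :
    pvLoopA substrs msgs = msgs.any (fun m => substrs.all (fun s => PySem.Str.isIn s m)) := by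
  induction msgs with
  | nil => rfl
  | cons msg rest ih =>
      simp only [pvLoopA]
      rw [pvMissed_eq, Bool.false_or, ih, List.any_cons]
      cases hall : substrs.all (fun s => PySem.Str.isIn s msg) <;> simp [hall]

-- membership in the hit-index set of one substring
theorem pvMem_hits (msgs : List String) (s : String) (i : Int) :
    i ∈ pvHits msgs s ↔ ∃ (k : Nat) (h : k < msgs.length), i = (k : Int) ∧ PySem.Str.isIn s msgs[k] := by
  unfold pvHits
  rw [PySem.Set.mem_ofList]
  simp only [List.mem_map, List.mem_filter, PySem.List.mem_enumerate_iff]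
  constructor
  · rintro ⟨p, ⟨⟨k, hk, rfl⟩, hin⟩, rfl⟩
    exact ⟨k, hk, by simpa using hin⟩
  · rintro ⟨k, hk, rfl, hin⟩
    exact ⟨((k : Int), msgs[k]), ⟨⟨k, hk, by simp⟩, hin⟩, rfl⟩

-- B's loop on a nonempty candidate set: some candidate index hits every substring
theorem pvLoopB_eq (msgs : List String) (substrs : List String) (cands : PySem.Set Int)
    (h : cands ≠ []) :
    pvLoopB msgs substrs cands
      = cands.any (fun i => substrs.all (fun s => decide (i ∈ pvHits msgs s))) := by
  induction substrs generalizing cands with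
  | nil =>
      simp only [pvLoopB, List.all_nil]
      symm
      rw [List.any_eq_true]
      exact ⟨cands.head h, List.head_mem h, rfl⟩
  | cons s rest ih =>
      simp only [pvLoopB]
      have hfilter : PySem.Set.inter cands (pvHits msgs s)
          = cands.filter (fun i => decide (i ∈ pvHits msgs s)) := by
        simp [PySem.Set.inter, PySem.Set.contains_eq_listContains, List.contains_eq_mem]
      rw [hfilter]
      by_cases he : (cands.filter (fun i => decide (i ∈ pvHits msgs s))).isEmpty
      · rw [if_pos he]
        rw [List.isEmpty_iff, List.filter_eq_nil_iff] at he
        symm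
        rw [List.any_eq_false]
        intro i hi
        have hf : ¬ i ∈ pvHits msgs s := by simpa using he i hi
        simp [List.all_cons, hf]
      · rw [if_neg he]
        rw [ih _ (by simpa [List.isEmpty_iff] using he), List.any_filter]
        simp [List.all_cons]

-- the initial candidate set 'set(range(len(msgs)))' scanned with the hit criterion equals A's scan of msgs
theorem pvRange_any_eq (substrs : List String) (msgs : List String) :
    (PySem.Set.ofList (PySem.List.pyRange 0 msgs.length 1)).any
        (fun i => substrs.all (fun s => decide (i ∈ pvHits msgs s)))
      = msgs.any (fun m => substrs.all (fun s => PySem.Str.isIn s m)) := by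
  rw [PySem.Set.ofList_eq_self_of_nodup _ (PySem.List.nodup_pyRange_one 0 msgs.length)]
  rw [Bool.eq_iff_iff]
  simp only [List.any_eq_true, List.all_eq_true, PySem.List.mem_pyRange_one, decide_eq_true_iff]
  constructor
  · rintro ⟨i, ⟨hi0, hin⟩, hall⟩
    refine ⟨msgs[i.toNat]'(by omega), List.getElem_mem _, fun s hs => ?_⟩
    rcases (pvMem_hits msgs s i).mp (hall s hs) with ⟨k, hk, hik, hin'⟩
    have : i.toNat = k := by omega
    simpa [this] using hin'
  · rintro ⟨m, hm, hall⟩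
    rcases List.mem_iff_getElem.mp hm with ⟨k, hk, rfl⟩
    refine ⟨(k : Int), ⟨by positivity, by exact_mod_cast hk⟩, fun s hs => ?_⟩
    exact (pvMem_hits msgs s k).mpr ⟨k, hk, rfl, hall s hs⟩

-- ===== VERDICT (by name: the statement is the Claim_ definition above) =====
theorem check_all_substrs_in_spec : Claim_equal_check_all_substrs_in := by
  intro substrs msgs _
  unfold Spec_check_all_substrs_in check_all_substrs_in check_all_substrs_in_alt
  by_cases h : substrs.isEmpty || msgs.isEmpty
  · simp [h]
  · simp only [h, if_false]
    simp only [Bool.or_eq_true, not_or, List.isEmpty_iff] at h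
    have hne : PySem.Set.ofList (PySem.List.pyRange 0 (msgs.length : Int) 1) ≠ [] := by
      rw [PySem.Set.ofList_eq_self_of_nodup _ (PySem.List.nodup_pyRange_one 0 msgs.length)]
      intro hnil
      have hlen := congrArg List.length hnil
      rw [PySem.List.length_pyRange_one] at hlen
      simp only [List.length_nil, sub_zero, Int.toNat_natCast] at hlen
      exact h.2 (List.eq_nil_of_length_eq_zero hlen)
    rw [pvLoopA_eq, pvLoopB_eq _ _ _ hne, pvRange_any_eq]
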